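-- pv_equiv track=rewrite | github.com/pypi-data/pypi-mirror-400 | packages/somaya/somaya-1.0.5-py3-none-any.whl/src/core/core_tokenizer.py | weighted_char_sum_runaware
-- ===== SOURCE A (Python) =====
-- def _len(s):
--     n = 0
--     for _ in s:
--         n += 1
--     return n
--
-- def _is_alpha(ch):
--     c = ord(ch)
--     return (65 <= c <= 90) or (97 <= c <= 122)
--
-- def weighted_char_sum_runaware(token_text):
--     # Treat consecutive same letters as collapsed to one, but multiply by run length
--     # Non-letters are counted normally (no collapsing)
--     total = 0
--     eff_index = 1  # index of effective characters after collapsing runs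
--     n = _len(token_text)
--     i = 0
--     while i < n:
--         ch = token_text[i]
--         if _is_alpha(ch):
--             # count run length
--             run_len = 1
--             j = i + 1
--             while j < n and token_text[j] == ch:
--                 run_len += 1
--                 j += 1
--             total += (ord(ch) * eff_index) * run_len
--             eff_index += 1
--             i = j
--         else:
--             total += ord(ch) * eff_index
--             eff_index += 1
--             i += 1
--     return total
-- ===== SOURCE B (Python) =====
-- def weighted_char_sum_runaware(token_text):
--     # Single flat pass: a continuing letter run reuses the previous effective index.
--     total = 0
--     eff_index = 1
--     prev = None
--     for ch in token_text:
--         c = ord(ch)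
--         alpha = (65 <= c <= 90) or (97 <= c <= 122)
--         if alpha and prev == ch:
--             total += c * (eff_index - 1)
--         else:
--             total += c * eff_index
--             eff_index += 1
--             prev = ch if alpha else None
--     return total
-- ===== Notes on version B (the rewrite author's own statement) =====
-- stated objective: simpler
-- what changed: Replaced the index-based outer loop with a nested run-counting inner while-loop by a single flat for-loop over the characters that carries the previous letter and reuses eff_index-1 while a run continues.
import Mathlib
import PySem

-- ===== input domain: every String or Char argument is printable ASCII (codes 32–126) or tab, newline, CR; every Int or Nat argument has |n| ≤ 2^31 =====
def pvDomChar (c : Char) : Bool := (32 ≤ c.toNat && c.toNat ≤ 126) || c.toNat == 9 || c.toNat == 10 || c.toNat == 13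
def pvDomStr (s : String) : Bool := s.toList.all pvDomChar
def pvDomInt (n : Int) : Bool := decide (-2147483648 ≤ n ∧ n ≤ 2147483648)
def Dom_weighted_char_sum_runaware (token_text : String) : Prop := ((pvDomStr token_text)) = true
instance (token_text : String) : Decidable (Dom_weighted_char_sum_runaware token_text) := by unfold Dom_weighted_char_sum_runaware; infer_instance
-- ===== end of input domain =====

-- B replaces A's index-based outer loop with nested run-counting inner loop by a single
-- flat pass carrying the previous letter (objective: simpler).

-- ===== PORT A =====
-- _len: the manual counting loop
def pvLenA (s : List Char) : Nat := s.foldl (fun n _ => n + 1) 0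

-- _is_alpha
def pvIsAlphaA (ch : Char) : Bool :=
  (65 ≤ ch.toNat && ch.toNat ≤ 90) || (97 ≤ ch.toNat && ch.toNat ≤ 122)

-- inner while loop: while j < n and token_text[j] == ch: run_len += 1; j += 1
def pvRunA (s : List Char) (n : Nat) (ch : Char) (run_len j : Nat) : Nat × Nat :=
  if _h : j < n ∧ s.getD j ' ' == ch then pvRunA s n ch (run_len + 1) (j + 1)
  else (run_len, j)
termination_by n - j
decreasing_by omega

theorem pvRunA_ge (s : List Char) (n : Nat) (ch : Char) (run_len j : Nat) :
    j ≤ (pvRunA s n ch run_len j).2 := by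
  fun_induction pvRunA with
  | case1 _ _ ih => omega
  | case2 => simp

-- outer while loop of A
def pvLoopA (s : List Char) (n : Nat) (i : Nat) (eff total : Int) : Int :=
  if _h : i < n then
    let ch := s.getD i ' '
    if pvIsAlphaA ch then
      let p := pvRunA s n ch 1 (i + 1)
      pvLoopA s n p.2 (eff + 1) (total + ((ch.toNat : Int) * eff) * p.1)
    else
      pvLoopA s n (i + 1) (eff + 1) (total + (ch.toNat : Int) * eff)
  else total
termination_by n - i
decreasing_by
  · have := pvRunA_ge s n (s.getD i ' ') 1 (i + 1); omega
  · omega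

def weighted_char_sum_runaware (token_text : String) : Int :=
  pvLoopA token_text.toList (pvLenA token_text.toList) 0 1 0

-- ===== PORT B =====
-- one flat pass: state = (total, eff_index, prev)
def pvStepB (st : Int × Int × Option Char) (ch : Char) : Int × Int × Option Char :=
  let c : Int := ch.toNat
  let alpha : Bool := (65 ≤ c && c ≤ 90) || (97 ≤ c && c ≤ 122)
  if alpha && st.2.2 == some ch then
    (st.1 + c * (st.2.1 - 1), st.2.1, st.2.2)
  else
    (st.1 + c * st.2.1, st.2.1 + 1, if alpha then some ch else none)

def weighted_char_sum_runaware_alt (token_text : String) : Int :=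
  (token_text.toList.foldl pvStepB (0, 1, none)).1

-- ===== PRECONDITION & SPEC =====
def Spec_weighted_char_sum_runaware (token_text : String) (out : Int) : Prop := out = weighted_char_sum_runaware_alt token_text
instance (token_text : String) (out : Int) : Decidable (Spec_weighted_char_sum_runaware token_text out) := by unfold Spec_weighted_char_sum_runaware; infer_instance

-- ===== CLAIM (what is proved, stated in full; the proofs are below) =====
def Claim_equal_weighted_char_sum_runaware : Prop := ∀ (token_text : String), Dom_weighted_char_sum_runaware token_text → Spec_weighted_char_sum_runaware token_text (weighted_char_sum_runaware token_text)

-- ===== LEMMAS AND PROOFS =====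

theorem pvRunA_spec (s : List Char) (n : Nat) (ch : Char) (run_len j : Nat) (hn : n = s.length) :
    pvRunA s n ch run_len j =
      (run_len + ((s.drop j).takeWhile (· == ch)).length,
       j + ((s.drop j).takeWhile (· == ch)).length) := by
  fun_induction pvRunA with
  | case1 run_len j h ih =>
    have hjn : j < s.length := hn ▸ h.1
    have hd : s.drop j = s[j] :: s.drop (j + 1) := List.drop_eq_getElem_cons hjn
    have hget : s.getD j ' ' = s[j] := List.getD_eq_getElem s ' ' hjn
    have heq : s[j] = ch := by
      have h2 := h.2; rw [hget] at h2; exact eq_of_beq h2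
    have htw : (s.drop j).takeWhile (· == ch)
        = s[j] :: (s.drop (j + 1)).takeWhile (· == ch) := by
      rw [hd, List.takeWhile_cons_of_pos (by simp [heq])]
    rw [ih]
    simp [htw]; omega
  | case2 run_len j h =>
    by_cases hjn : j < s.length
    · have hd : s.drop j = s[j] :: s.drop (j + 1) := List.drop_eq_getElem_cons hjn
      have hget : s.getD j ' ' = s[j] := List.getD_eq_getElem s ' ' hjn
      have hne : (s[j] == ch) = false := by
        rw [← hget]
        by_contra hb
        exact h ⟨hn ▸ hjn, by simpa using hb⟩
      rw [hd, List.takeWhile_cons_of_neg (by simp [hne])]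
      simp
    · have : s.drop j = [] := List.drop_eq_nil_of_le (by omega)
      simp [this]

def pvRuns : List Char → Int → Int
  | [], _ => 0
  | ch :: rest, e =>
    if pvIsAlphaA ch then
      ((ch.toNat : Int) * e) * (1 + ((rest.takeWhile (· == ch)).length : Int))
        + pvRuns (rest.dropWhile (· == ch)) (e + 1)
    else (ch.toNat : Int) * e + pvRuns rest (e + 1)
termination_by l => l.length
decreasing_by
  · have := List.length_dropWhile_le (· == ch) rest; simpa using Nat.lt_succ_of_le this
  · simp

theorem dropWhile_eq_drop_len (l : List Char) (p : Char → Bool) :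
    l.dropWhile p = l.drop (l.takeWhile p).length := by
  induction l with
  | nil => simp
  | cons a t ih =>
    by_cases h : p a
    · rw [List.dropWhile_cons_of_pos h, List.takeWhile_cons_of_pos h]
      simpa using ih
    · rw [List.dropWhile_cons_of_neg h, List.takeWhile_cons_of_neg h]
      simp

theorem pvLoopA_spec (s : List Char) (n : Nat) (i : Nat) (eff total : Int) (hn : n = s.length) :
    pvLoopA s n i eff total = total + pvRuns (s.drop i) eff := by
  fun_induction pvLoopA with
  | case1 i eff total h ch halpha p ih =>
    have hin : i < s.length := hn ▸ h
    have hd : s.drop i = s[i] :: s.drop (i + 1) := List.drop_eq_getElem_cons hin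
    have hch : ch = s[i] := List.getD_eq_getElem s ' ' hin
    set k := ((s.drop (i + 1)).takeWhile (· == ch)).length with hk
    have hp : p = (1 + k, i + 1 + k) := by
      rw [show p = pvRunA s n ch 1 (i + 1) from rfl]
      exact pvRunA_spec s n ch 1 (i + 1) hn
    rw [ih, hp, hd]
    have hruns : pvRuns (s[i] :: s.drop (i + 1)) eff
        = ((s[i].toNat : Int) * eff) * (1 + (((s.drop (i + 1)).takeWhile (· == s[i])).length : Int))
          + pvRuns ((s.drop (i + 1)).dropWhile (· == s[i])) (eff + 1) := by
      simp only [pvRuns]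
      rw [if_pos (hch ▸ halpha)]
    rw [hruns, ← hch]
    have hdw : (s.drop (i + 1)).dropWhile (· == ch) = s.drop (i + 1 + k) := by
      rw [dropWhile_eq_drop_len, ← hk, List.drop_drop]
    rw [hdw, ← hk]
    push_cast
    ring
  | case2 i eff total h ch halpha ih =>
    have hin : i < s.length := hn ▸ h
    have hd : s.drop i = s[i] :: s.drop (i + 1) := List.drop_eq_getElem_cons hin
    have hch : ch = s[i] := List.getD_eq_getElem s ' ' hin
    rw [ih, hd]
    have hruns : pvRuns (s[i] :: s.drop (i + 1)) eff
        = (s[i].toNat : Int) * eff + pvRuns (s.drop (i + 1)) (eff + 1) := by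
      simp only [pvRuns]
      rw [if_neg (by rw [← hch]; simpa using halpha)]
    rw [hruns, ← hch]
    ring
  | case3 i eff total h =>
    have hdrop : s.drop i = [] := List.drop_eq_nil_of_le (by omega)
    simp [hdrop, pvRuns]
theorem pvAlphaB_eq (ch : Char) :
    ((65 ≤ (ch.toNat : Int) && (ch.toNat : Int) ≤ 90) || (97 ≤ (ch.toNat : Int) && (ch.toNat : Int) ≤ 122))
      = pvIsAlphaA ch := by
  rw [Bool.eq_iff_iff]
  simp only [pvIsAlphaA, Bool.or_eq_true, Bool.and_eq_true, decide_eq_true_eq]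
  omega

theorem pvStepB_run (t e : Int) (ch : Char) (halpha : pvIsAlphaA ch = true) :
    pvStepB (t, e, some ch) ch = (t + (ch.toNat : Int) * (e - 1), e, some ch) := by
  have hcond : ((65 ≤ (ch.toNat : Int) && (ch.toNat : Int) ≤ 90) || (97 ≤ (ch.toNat : Int) && (ch.toNat : Int) ≤ 122)) = true := by
    rw [pvAlphaB_eq]; exact halpha
  simp only [pvStepB]
  rw [hcond]
  simp

theorem pvStepB_fresh (t e : Int) (p : Option Char) (ch : Char)
    (h : (p == some ch) = false) :
    pvStepB (t, e, p) ch
      = (t + (ch.toNat : Int) * e, e + 1, if pvIsAlphaA ch then some ch else none) := by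
  simp only [pvStepB, h, Bool.and_false, Bool.false_eq_true, if_false, pvAlphaB_eq]

theorem pvFoldB_replicate (k : Nat) (ch : Char) (rest : List Char) (t e : Int)
    (halpha : pvIsAlphaA ch = true) :
    ((List.replicate k ch ++ rest).foldl pvStepB (t, e, some ch)).1
      = (rest.foldl pvStepB (t + (ch.toNat : Int) * (e - 1) * k, e, some ch)).1 := by
  induction k generalizing t with
  | zero => simp
  | succ m ih =>
    rw [List.replicate_succ, List.cons_append, List.foldl_cons, pvStepB_run t e ch halpha, ih]
    have harg : t + (ch.toNat : Int) * (e - 1) + (ch.toNat : Int) * (e - 1) * (m : Int)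
        = t + (ch.toNat : Int) * (e - 1) * ((m + 1 : Nat) : Int) := by
      push_cast; ring
    rw [harg]

theorem pvFoldB_switch (ch' : Char) (rest : List Char) (t e : Int) (ch : Char)
    (hne : ch' ≠ ch) :
    ((ch' :: rest).foldl pvStepB (t, e, some ch)).1
      = ((ch' :: rest).foldl pvStepB (t, e, none)).1 := by
  have h1 : (some ch == some ch') = false := by simpa using fun e => hne e.symm
  have h2 : ((none : Option Char) == some ch') = false := by simp
  rw [List.foldl_cons, List.foldl_cons,
    pvStepB_fresh t e (some ch) ch' h1, pvStepB_fresh t e none ch' h2]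

theorem takeWhile_eq_replicate (l : List Char) (ch : Char) :
    l.takeWhile (· == ch) = List.replicate (l.takeWhile (· == ch)).length ch := by
  induction l with
  | nil => simp
  | cons a rest ih =>
    by_cases h : a = ch
    · rw [List.takeWhile_cons_of_pos (by simp [h])]
      simp only [List.length_cons, List.replicate_succ, h, List.cons.injEq]
      exact ⟨trivial, ih⟩
    · rw [List.takeWhile_cons_of_neg (by simpa using h)]
      simp

theorem dropWhile_head_false (l : List Char) (p : Char → Bool) (c : Char) (r : List Char)
    (h : l.dropWhile p = c :: r) : p c = false := by
  induction l with
  | nil => simp at h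
  | cons a t ih =>
    by_cases hp : p a
    · rw [List.dropWhile_cons_of_pos hp] at h; exact ih h
    · rw [List.dropWhile_cons_of_neg hp] at h
      cases h; simpa using hp

theorem pvFoldB_none (n : Nat) :
    ∀ (l : List Char), l.length ≤ n → ∀ (t e : Int),
      (l.foldl pvStepB (t, e, none)).1 = t + pvRuns l e := by
  induction n with
  | zero =>
    intro l hl t e
    have : l = [] := List.eq_nil_of_length_eq_zero (by omega)
    simp [this, pvRuns]
  | succ m ih =>
    intro l hl t e
    cases l with
    | nil => simp [pvRuns]
    | cons ch rest =>
      have hfirst : pvStepB (t, e, none) ch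
          = (t + (ch.toNat : Int) * e, e + 1, if pvIsAlphaA ch then some ch else none) :=
        pvStepB_fresh t e none ch (by simp)
      by_cases halpha : pvIsAlphaA ch = true
      · rw [List.foldl_cons, hfirst, if_pos halpha]
        set k := (rest.takeWhile (· == ch)).length with hk
        have hsplit : rest = List.replicate k ch ++ rest.dropWhile (· == ch) := by
          conv_lhs => rw [← List.takeWhile_append_dropWhile (p := (· == ch)) (l := rest)]
          rw [← takeWhile_eq_replicate rest ch]
        rw [show rest.foldl pvStepB (t + (ch.toNat : Int) * e, e + 1, some ch)
              = (List.replicate k ch ++ rest.dropWhile (· == ch)).foldl pvStepB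
                  (t + (ch.toNat : Int) * e, e + 1, some ch) from by rw [← hsplit]]
        rw [pvFoldB_replicate k ch _ _ _ halpha]
        have hlen : (rest.dropWhile (· == ch)).length ≤ m := by
          have := List.length_dropWhile_le (· == ch) rest
          simp only [List.length_cons] at hl; omega
        have hrest : ∀ (t' : Int),
            ((rest.dropWhile (· == ch)).foldl pvStepB (t', e + 1, some ch)).1
              = ((rest.dropWhile (· == ch)).foldl pvStepB (t', e + 1, none)).1 := by
          intro t'
          cases hdw : rest.dropWhile (· == ch) with
          | nil => simp
          | cons c' r' =>
            have hc' : (c' == ch) = false := dropWhile_head_false rest _ c' r' hdw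
            exact pvFoldB_switch c' r' _ _ ch (by simpa using hc')
        rw [hrest, ih _ hlen]
        have hruns : pvRuns (ch :: rest) e
            = ((ch.toNat : Int) * e) * (1 + (k : Int))
              + pvRuns (rest.dropWhile (· == ch)) (e + 1) := by
          simp only [pvRuns]
          rw [if_pos halpha, ← hk]
        rw [hruns]
        ring
      · rw [List.foldl_cons, hfirst, if_neg halpha]
        have hlen : rest.length ≤ m := by simp only [List.length_cons] at hl; omega
        rw [ih _ hlen]
        have hruns : pvRuns (ch :: rest) e
            = (ch.toNat : Int) * e + pvRuns rest (e + 1) := by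
          simp only [pvRuns]
          rw [if_neg (by simpa using halpha)]
        rw [hruns]
        ring

theorem pvLenA_eq (s : List Char) : pvLenA s = s.length := by
  have h : ∀ (l : List Char) (n : Nat), l.foldl (fun n _ => n + 1) n = n + l.length := by
    intro l
    induction l with
    | nil => simp
    | cons a t ih => intro n; rw [List.foldl_cons, ih]; simp; omega
  simp only [pvLenA, h s 0, Nat.zero_add]

-- ===== VERDICT (by name: the statement is the Claim_ definition above) =====
theorem weighted_char_sum_runaware_spec : Claim_equal_weighted_char_sum_runaware := by
  intro s _
  unfold Spec_weighted_char_sum_runaware weighted_char_sum_runaware weighted_char_sum_runaware_alt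
  rw [pvLoopA_spec s.toList (pvLenA s.toList) 0 1 0 (pvLenA_eq s.toList)]
  rw [pvFoldB_none s.toList.length s.toList (le_refl _) 0 1]
  simp
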